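-- pv_equiv track=rewrite | github.com/SeatacAlert/leetcode | 1850.py | getMinSwaps
-- ===== SOURCE A (Python) =====
-- def getMinSwaps(num: str, k: int) -> int:
--     l = list(num)
--     o = list(num)
--     n = len(l)
--     for _ in range(k):
--         for i in range(n - 2, -1, -1):
--             if l[i] < l[i + 1]:
--                 break
--         for j in range(n - 1, -1, -1):
--             if l[j] > l[i]:
--                 break
--         l[i], l[j] = l[j], l[i]
--         l[i + 1:] = l[i + 1:][::-1]
--
--     ans = 0
--     for _ in range(n):
--         if l[0] == o[0]:
--             l.pop(0)
--             o.pop(0)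
--         else:
--             p = o.index(l[0])
--             l.pop(0)
--             o.pop(p)
--             ans += p
--     return ans
-- ===== SOURCE B (Python) =====
-- from bisect import bisect_left, insort
--
-- def getMinSwaps(num: str, k: int) -> int:
--     # phase 1: advance to the k-th "next permutation" (same wrap behaviour as the
--     # break-style scans: pivots never go below index 0)
--     a = list(num)
--     for _ in range(k):
--         i = len(a) - 2
--         while i > 0 and a[i] >= a[i + 1]:
--             i -= 1
--         j = len(a) - 1
--         while j > 0 and a[j] <= a[i]:
--             j -= 1
--         a[i], a[j] = a[j], a[i]
--         a[i + 1:] = reversed(a[i + 1:])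
--     # phase 2: match each char of a to the leftmost unused equal char of num
--     # (a cursor per character), then count inversions of the position sequence
--     queues = {}
--     for idx, c in enumerate(num):
--         queues.setdefault(c, []).append(idx)
--     heads = {}
--     pos = []
--     for c in a:
--         h = heads.get(c, 0)
--         pos.append(queues[c][h])
--         heads[c] = h + 1
--     ans = 0
--     seen = []
--     for p in pos:
--         ans += len(seen) - bisect_left(seen, p)
--         insort(seen, p)
--     return ans
-- ===== Notes on version B (the rewrite author's own statement) =====
-- stated objective: alternative
-- what changed: The count phase no longer simulates the transformation by repeatedly popping list heads and re-searching with o.index: B matches each character of the transformed string to the leftmost unused equal character of num in one dict-of-position-queues pass and then counts inversions of the resulting position sequence with bisect/insort on a sorted list.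
import Mathlib
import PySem

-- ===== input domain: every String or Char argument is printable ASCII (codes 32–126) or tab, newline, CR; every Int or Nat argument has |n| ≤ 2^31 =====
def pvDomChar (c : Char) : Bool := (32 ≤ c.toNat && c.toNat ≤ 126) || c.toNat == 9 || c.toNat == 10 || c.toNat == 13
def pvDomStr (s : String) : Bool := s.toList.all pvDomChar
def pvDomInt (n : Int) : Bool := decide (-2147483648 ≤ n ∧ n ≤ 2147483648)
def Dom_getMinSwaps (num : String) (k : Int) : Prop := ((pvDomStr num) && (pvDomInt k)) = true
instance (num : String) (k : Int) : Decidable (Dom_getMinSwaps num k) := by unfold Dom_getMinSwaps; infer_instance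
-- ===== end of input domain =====

-- B replaces A's quadratic count phase (repeated list.pop(0)/o.index) by a one-pass
-- stable matching of equal characters plus a bisect-based inversion count.

-- ===== PORT A =====
-- 'l[i] < l[j]' on Python indices (the fallback branch is dead on admitted inputs)
def pvLtAt (l : List Char) (i j : Int) : Bool :=
  match PySem.List.pyGet? l i, PySem.List.pyGet? l j with
  | some x, some y => decide (x < y)
  | _, _ => false

-- 'for i in idxs: if p i: break' — the value the loop variable i has afterwards
-- (0 when idxs is empty, i.e. the NameError case, dead under Pre_)
def pvBreakScan (p : Int → Bool) : List Int → Int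
  | [] => 0
  | i :: rest => if p i then i else match rest with | [] => i | _ :: _ => pvBreakScan p rest

-- 'l[i], l[j] = l[j], l[i]' (indices are nonnegative on every reachable call)
def pvSwap (l : List Char) (i j : Int) : List Char :=
  match PySem.List.pyGet? l i, PySem.List.pyGet? l j with
  | some x, some y => (l.set i.toNat y).set j.toNat x
  | _, _ => l

-- one iteration of A's 'for _ in range(k)' body
def pvStepA (n : Int) (l : List Char) : List Char :=
  let i := pvBreakScan (fun i => pvLtAt l i (i + 1)) (PySem.List.pyRange (n - 2) (-1) (-1))
  let j := pvBreakScan (fun jj => pvLtAt l i jj) (PySem.List.pyRange (n - 1) (-1) (-1))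
  let l' := pvSwap l i j
  PySem.List.slice l' none (some (i + 1)) ++ (PySem.List.slice l' (some (i + 1)) none).reverse

-- A's count loop: 'for _ in range(n): …' popping from l and o
-- (the omitted-branch fallbacks are dead: l stays a permutation of o)
def pvCountA : Nat → List Char → List Char → Int → Int
  | 0, _, _, ans => ans
  | m + 1, lc :: lt, oc :: ot, ans =>
      if lc = oc then pvCountA m lt ot ans
      else match PySem.List.index? (oc :: ot) lc with
           | some p => pvCountA m lt ((oc :: ot).eraseIdx p) (ans + p)
           | none => ans
  | _ + 1, _, _, ans => ans

def getMinSwaps (num : String) (k : Int) : Int :=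
  let l0 := num.toList
  let n := l0.length
  let l := (PySem.List.pyRange 0 k 1).foldl (fun l _ => pvStepA (n : Int) l) l0
  pvCountA n l num.toList 0

-- ===== PORT B =====
-- 'l[i] <= l[j]' on Python indices (fallback dead on admitted inputs)
def pvLeAt (l : List Char) (i j : Int) : Bool :=
  match PySem.List.pyGet? l i, PySem.List.pyGet? l j with
  | some x, some y => decide (x ≤ y)
  | _, _ => false

-- 'while i > 0 and c(i): i -= 1'
def pvWhileDec (c : Int → Bool) (i : Int) : Int :=
  if h : 0 < i ∧ c i then pvWhileDec c (i - 1) else i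
termination_by i.toNat
decreasing_by omega

-- one iteration of B's 'for _ in range(k)' body
def pvStepB (a : List Char) : List Char :=
  let i := pvWhileDec (fun i => pvLeAt a (i + 1) i) ((a.length : Int) - 2)
  let j := pvWhileDec (fun jj => pvLeAt a jj i) ((a.length : Int) - 1)
  let a' := pvSwap a i j
  a'.take (i + 1).toNat ++ (a'.drop (i + 1).toNat).reverse

-- B's matching loop: 'for c in a: h = heads.get(c, 0); pos.append(queues[c][h]); heads[c] = h + 1'
def pvPosList (qd : PySem.Dict Char (List Int)) (a : List Char) : List Int :=
  (a.foldl (fun (st : List Int × PySem.Dict Char Int) c =>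
      let h := st.2.getD c 0
      (st.1 ++ [PySem.List.pyGetD (qd.getD c []) h 0], st.2.insert c (h + 1)))
    ([], PySem.Dict.empty)).1

-- B's inversion loop: 'for p in pos: ans += len(seen) - bisect_left(seen, p); insort(seen, p)'
def pvInvLoop : List Int → List Int → Int → Int
  | [], _, ans => ans
  | p :: ps, seen, ans =>
      pvInvLoop ps (PySem.List.insert seen ((PySem.List.bisectRight seen p : Nat) : Int) p)
        (ans + ((seen.length : Int) - (PySem.List.bisectLeft seen p : Int)))

def getMinSwaps_alt (num : String) (k : Int) : Int :=
  let a := (PySem.List.pyRange 0 k 1).foldl (fun a _ => pvStepB a) num.toList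
  let qd := (PySem.List.enumerate num.toList 0).foldl
      (fun d p => d.modify p.2 [] (· ++ [p.1])) PySem.Dict.empty
  pvInvLoop (pvPosList qd a) [] 0

-- ===== PRECONDITION & SPEC =====
-- A raises NameError (the first break-scan loop body never runs, leaving i unbound)
-- exactly when k ≥ 1 and len(num) ≤ 1; those inputs are excluded, nothing else is.
def Pre_getMinSwaps (num : String) (k : Int) : Prop := k ≤ 0 ∨ 2 ≤ num.toList.length
instance (num : String) (k : Int) : Decidable (Pre_getMinSwaps num k) := by
  unfold Pre_getMinSwaps; infer_instance

def pvWitness_getMinSwaps : String × Int := ("0123", 3)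

def Spec_getMinSwaps (num : String) (k : Int) (out : Int) : Prop := out = getMinSwaps_alt num k
instance (num : String) (k : Int) (out : Int) : Decidable (Spec_getMinSwaps num k out) := by
  unfold Spec_getMinSwaps; infer_instance

-- ===== CLAIM (what is proved, stated in full; the proofs are below) =====
def Claim_equal_getMinSwaps : Prop := ∀ (num : String) (k : Int), Dom_getMinSwaps num k →
  Pre_getMinSwaps num k → Spec_getMinSwaps num k (getMinSwaps num k)

-- ===== LEMMAS AND PROOFS =====

-- proof-side specifications -------------------------------------------------

-- remove the first pair with second component c, returning its first component
def pvPluck (c : Char) : List (Int × Char) → Option (Int × List (Int × Char))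
  | [] => none
  | p :: s => if p.2 = c then some (p.1, s)
              else (pvPluck c s).map (fun r => (r.1, p :: r.2))

-- positions assigned by repeatedly plucking the leftmost pair carrying each char
def pvPosSpec : List Char → List (Int × Char) → List Int
  | [], _ => []
  | c :: l, s => match pvPluck c s with
      | some (p, s') => p :: pvPosSpec l s'
      | none => pvPosSpec l s

-- A's count phase, written as erase-first-occurrence recursion
def pvGreedy : List Char → List Char → Int
  | [], _ => 0
  | c :: l, o => ((o.idxOf c : Nat) : Int) + pvGreedy l (o.erase c)

-- number of inversions, counted front to back
def pvInvSpec : List Int → Int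
  | [] => 0
  | p :: ps => ((ps.countP (fun q => q < p) : Nat) : Int) + pvInvSpec ps

-- phase-1 lemmas -------------------------------------------------------------

-- helper: valid-index gets
lemma pv_get_some (l : List Char) (i : Int) (h0 : 0 ≤ i) (h1 : i < l.length) :
    PySem.List.pyGet? l i = some (l[i.toNat]'(by omega)) := by
  exact PySem.List.pyGet?_eq_some_getElem l h0 h1

lemma pv_le_not_lt (l : List Char) (i j : Int) (h0 : 0 ≤ i) (h1 : i < l.length)
    (g0 : 0 ≤ j) (g1 : j < l.length) :
    pvLeAt l j i = !pvLtAt l i j := by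
  rw [pvLeAt, pvLtAt, pv_get_some l i h0 h1, pv_get_some l j g0 g1]
  rw [Bool.eq_iff_iff]
  simp [not_lt]

lemma pv_scan_eq_while (p q : Int → Bool) (m : Nat)
    (h : ∀ i : Int, 0 ≤ i → i ≤ m → q i = !p i) :
    pvBreakScan p (PySem.List.pyRange (m : Int) (-1) (-1)) = pvWhileDec q (m : Int) := by
  induction m with
  | zero =>
      rw [PySem.List.pyRange_neg_one_cons (by norm_num), PySem.List.pyRange_neg_one_eq_nil (by norm_num)]
      rw [pvWhileDec]
      simp [pvBreakScan]
  | succ m ih =>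
      have hcons : PySem.List.pyRange ((m:Int)+1) (-1) (-1)
          = ((m:Int)+1) :: PySem.List.pyRange ((m : Nat) : Int) (-1) (-1) := by
        rw [PySem.List.pyRange_neg_one_cons (by omega)]
        norm_num
      have hne : PySem.List.pyRange ((m : Nat) : Int) (-1) (-1) ≠ [] := by
        rw [PySem.List.pyRange_neg_one_cons (by omega)]; simp
      have hq : q ((m:Int)+1) = !p ((m:Int)+1) := h _ (by omega) (by push_cast; omega)
      push_cast
      rw [hcons, pvWhileDec]
      by_cases hp : p ((m:Int)+1)
      · have hc : ¬ (0 < (m:Int)+1 ∧ q ((m:Int)+1) = true) := by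
          simp [hq, hp]
        rw [dif_neg hc]
        simp [pvBreakScan, hp]
      · have hcond : (0 < (m:Int)+1 ∧ q ((m:Int)+1) = true) := by
          refine ⟨by omega, ?_⟩
          simp [hq, hp]
        rw [dif_pos hcond]
        have hstep : (m:Int) + 1 - 1 = ((m:Nat):Int) := by ring
        rw [hstep, ← ih (fun i h0 hm => h i h0 (by push_cast; omega))]
        obtain ⟨x, xs, hxs⟩ : ∃ x xs, PySem.List.pyRange ((m : Nat) : Int) (-1) (-1) = x :: xs :=
          List.exists_cons_of_ne_nil hne
        simp [pvBreakScan, hp, hxs]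


lemma pv_while_bounds (q : Int → Bool) (i : Int) (hi : 0 ≤ i) :
    0 ≤ pvWhileDec q i ∧ pvWhileDec q i ≤ i := by
  fun_induction pvWhileDec q i with
  | case1 i h ih =>
      have := ih (by omega)
      constructor <;> omega
  | case2 i h => omega

lemma pv_stepAB (l : List Char) (h2 : 2 ≤ l.length) :
    pvStepA (l.length : Int) l = pvStepB l := by
  rw [pvStepA, pvStepB]
  have hm2 : ((l.length : Int) - 2) = ((l.length - 2 : Nat) : Int) := by push_cast [h2]; omega
  have hm1 : ((l.length : Int) - 1) = ((l.length - 1 : Nat) : Int) := by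
    push_cast [Nat.one_le_iff_ne_zero.mpr (by omega : l.length ≠ 0)]; omega
  have hi : pvBreakScan (fun i => pvLtAt l i (i + 1)) (PySem.List.pyRange ((l.length:Int) - 2) (-1) (-1))
      = pvWhileDec (fun i => pvLeAt l (i + 1) i) ((l.length:Int) - 2) := by
    rw [hm2]
    apply pv_scan_eq_while
    intro i h0 hle
    exact pv_le_not_lt l i (i+1) h0 (by omega) (by omega) (by omega)
  rw [hi]
  have hib := pv_while_bounds (fun i => pvLeAt l (i + 1) i) ((l.length:Int) - 2) (by omega)
  set i := pvWhileDec (fun i => pvLeAt l (i + 1) i) ((l.length:Int) - 2) with hidef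
  have hj : pvBreakScan (fun jj => pvLtAt l i jj) (PySem.List.pyRange ((l.length:Int) - 1) (-1) (-1))
      = pvWhileDec (fun jj => pvLeAt l jj i) ((l.length:Int) - 1) := by
    rw [hm1]
    apply pv_scan_eq_while
    intro jj h0 hle
    exact pv_le_not_lt l i jj (by omega) (by omega) h0 (by omega)
  rw [hj]
  set j := pvWhileDec (fun jj => pvLeAt l jj i) ((l.length:Int) - 1) with hjdef
  rw [PySem.List.slice_to (pvSwap l i j) (b := i+1) (by omega), PySem.List.slice_from (pvSwap l i j) (a := i+1) (by omega)]

lemma pv_stepB_perm (l : List Char) (h2 : 2 ≤ l.length) : (pvStepB l).Perm l := by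
  rw [pvStepB]
  have hib := pv_while_bounds (fun i => pvLeAt l (i + 1) i) ((l.length:Int) - 2) (by omega)
  set i := pvWhileDec (fun i => pvLeAt l (i + 1) i) ((l.length:Int) - 2) with hidef
  have hjb := pv_while_bounds (fun jj => pvLeAt l jj i) ((l.length:Int) - 1) (by omega)
  set j := pvWhileDec (fun jj => pvLeAt l jj i) ((l.length:Int) - 1) with hjdef
  have hswap : (pvSwap l i j).Perm l := by
    rw [pvSwap, pv_get_some l i (by omega) (by omega), pv_get_some l j (by omega) (by omega)]
    exact List.set_set_perm (by omega) (by omega)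
  refine List.Perm.trans ?_ hswap
  refine List.Perm.trans (List.Perm.append_left _ (List.reverse_perm _)) ?_
  rw [List.take_append_drop]


lemma pv_fold_eq (n0 : Nat) (r : List Int) : ∀ (l : List Char), l.length = n0 → 2 ≤ n0 →
    (r.foldl (fun l _ => pvStepA (n0 : Int) l) l = r.foldl (fun a _ => pvStepB a) l ∧
      (r.foldl (fun a _ => pvStepB a) l).Perm l) := by
  induction r with
  | nil => intro l _ _; exact ⟨rfl, List.Perm.refl l⟩
  | cons x r ih =>
      intro l h1 h2
      simp only [List.foldl_cons]
      have hstep : pvStepA (n0 : Int) l = pvStepB l := by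
        rw [← h1]; exact pv_stepAB l (by omega)
      have hsp : (pvStepB l).Perm l := pv_stepB_perm l (by omega)
      have hlen : (pvStepB l).length = n0 := by rw [hsp.length_eq, h1]
      obtain ⟨e, p⟩ := ih (pvStepB l) hlen h2
      exact ⟨by rw [hstep, e], p.trans hsp⟩

-- phase-2 lemmas -------------------------------------------------------------

lemma pv_idxOf?_of_mem {l : List Char} {c : Char} (h : c ∈ l) :
    List.idxOf? c l = some (List.idxOf c l) := by
  have h1 := List.isSome_idxOf?.mpr h
  cases hx : List.idxOf? c l with
  | none => rw [hx] at h1; simp at h1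
  | some v => rw [List.idxOf_eq_getD_idxOf?, hx]; rfl

lemma pv_countA_greedy (l : List Char) : ∀ (o : List Char) (ans : Int), l.Perm o →
    pvCountA l.length l o ans = ans + pvGreedy l o := by
  induction l with
  | nil => intro o ans h; simp [pvCountA, pvGreedy]
  | cons c lt ih =>
      intro o ans h
      match o, h.length_eq with
      | oc :: ot, _ =>
        by_cases hco : c = oc
        · subst hco
          have hperm : lt.Perm ot := h.cons_inv
          simp only [List.length_cons, pvCountA, pvGreedy, List.idxOf_cons_self,
            List.erase_cons_head]
          rw [ih ot ans hperm]
          norm_num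
        · have hmem : c ∈ oc :: ot := h.mem_iff.mp (List.mem_cons_self)
          have hidx : PySem.List.index? (oc :: ot) c = some ((oc :: ot).idxOf c) := by
            rw [PySem.List.index?_eq_idxOf?]
            exact pv_idxOf?_of_mem hmem
          have herase : (oc :: ot).eraseIdx ((oc :: ot).idxOf c) = (oc :: ot).erase c := by
            rw [List.erase_eq_eraseIdx]
            simp [pv_idxOf?_of_mem hmem]
          have hperm : lt.Perm ((oc :: ot).erase c) :=
            (List.cons_perm_iff_perm_erase.mp h).2
          simp only [List.length_cons, pvCountA, if_neg hco, hidx, herase, pvGreedy]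
          rw [ih _ _ hperm]
          ring

lemma pv_pluck_decomp {c : Char} : ∀ {s : List (Int × Char)} {p : Int} {s' : List (Int × Char)},
    pvPluck c s = some (p, s') →
    ∃ pre suf, s = pre ++ (p, c) :: suf ∧ s' = pre ++ suf ∧ ∀ x ∈ pre, x.2 ≠ c := by
  intro s
  induction s with
  | nil => intro p s' h; simp [pvPluck] at h
  | cons x xs ih =>
      intro p s' h
      rw [pvPluck] at h
      by_cases hx : x.2 = c
      · rw [if_pos hx] at h
        obtain ⟨hp, hs⟩ : x.1 = p ∧ xs = s' := by simpa [Prod.ext_iff] using h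
        refine ⟨[], xs, ?_, by simp [hs], by simp⟩
        have hxeq : x = (p, c) := Prod.ext hp hx
        simp [← hxeq]
      · rw [if_neg hx] at h
        cases hrec : pvPluck c xs with
        | none => rw [hrec] at h; simp at h
        | some r =>
            rw [hrec] at h
            obtain ⟨hp, hs⟩ : r.1 = p ∧ x :: r.2 = s' := by simpa [Prod.ext_iff] using h
            obtain ⟨pre, suf, h1, h2, h3⟩ := ih (p := r.1) (s' := r.2) (by rw [hrec])
            refine ⟨x :: pre, suf, ?_, ?_, ?_⟩
            · simp only [List.cons_append]
              rw [← hp, ← h1]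
            · rw [← hs, h2]; rfl
            · intro y hy
              rcases List.mem_cons.mp hy with rfl | hy
              · exact hx
              · exact h3 y hy

lemma pv_pluck_some {c : Char} : ∀ {s : List (Int × Char)}, c ∈ s.map (·.2) →
    ∃ p s', pvPluck c s = some (p, s') := by
  intro s
  induction s with
  | nil => simp
  | cons x xs ih =>
      intro h
      rw [pvPluck]
      by_cases hx : x.2 = c
      · exact ⟨x.1, xs, by rw [if_pos hx]⟩
      · have : c ∈ xs.map (·.2) := by
          rcases List.mem_map.mp h with ⟨y, hy, hyc⟩
          rcases List.mem_cons.mp hy with rfl | hy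
          · exact absurd hyc hx
          · exact List.mem_map.mpr ⟨y, hy, hyc⟩
        obtain ⟨p, s', hps⟩ := ih this
        exact ⟨p, x :: s', by rw [if_neg hx, hps]; rfl⟩

-- s is a permutation of (p,c) :: s' when pluck succeeds
lemma pv_pluck_perm {c : Char} {s : List (Int × Char)} {p : Int} {s' : List (Int × Char)}
    (h : pvPluck c s = some (p, s')) : s.Perm ((p, c) :: s') := by
  obtain ⟨pre, suf, h1, h2, _⟩ := pv_pluck_decomp h
  rw [h1, h2]
  exact List.perm_middle

lemma pv_posSpec_perm : ∀ (l : List Char) (s : List (Int × Char)),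
    l.Perm (s.map (·.2)) → (pvPosSpec l s).Perm (s.map (·.1)) := by
  intro l
  induction l with
  | nil =>
      intro s h
      have : s.map (·.2) = [] := (List.Perm.nil_eq h).symm
      have hs : s = [] := by simpa using congrArg List.length this
      simp [pvPosSpec, hs]
  | cons c lt ih =>
      intro s h
      obtain ⟨p, s', hps⟩ := pv_pluck_some (h.mem_iff.mp List.mem_cons_self)
      have hsp := pv_pluck_perm hps
      have hsnd : (s.map (·.2)).Perm (c :: s'.map (·.2)) := by
        simpa using hsp.map (·.2)
      have hlt : lt.Perm (s'.map (·.2)) := (h.trans hsnd).cons_inv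
      have hfst : (s.map (·.1)).Perm (p :: s'.map (·.1)) := by
        simpa using hsp.map (·.1)
      rw [pvPosSpec, hps]
      exact ((ih s' hlt).cons p).trans hfst.symm

lemma pv_core : ∀ (l : List Char) (s : List (Int × Char)),
    l.Perm (s.map (·.2)) → s.Pairwise (fun a b => a.1 < b.1) →
    pvGreedy l (s.map (·.2)) = pvInvSpec (pvPosSpec l s) := by
  intro l
  induction l with
  | nil =>
      intro s h _
      have : s.map (·.2) = [] := (List.Perm.nil_eq h).symm
      simp [pvGreedy, pvPosSpec, pvInvSpec]
  | cons c lt ih =>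
      intro s h hpw
      obtain ⟨p, s', hps⟩ := pv_pluck_some (h.mem_iff.mp List.mem_cons_self)
      obtain ⟨pre, suf, h1, h2, h3⟩ := pv_pluck_decomp hps
      have hsp := pv_pluck_perm hps
      have hsnd : (s.map (·.2)).Perm (c :: s'.map (·.2)) := by simpa using hsp.map (·.2)
      have hlt : lt.Perm (s'.map (·.2)) := (h.trans hsnd).cons_inv
      have hsub : s'.Sublist s := by
        rw [h1, h2]
        exact (List.sublist_cons_self _ _).append_left pre
      have hpw' : s'.Pairwise (fun a b => a.1 < b.1) := hpw.sublist hsub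
      -- pairwise facts across the decomposition
      rw [h1] at hpw
      obtain ⟨hpre, hrest, hcross⟩ := List.pairwise_append.mp hpw
      have hsufgt : ∀ y ∈ suf, p < y.1 := by
        intro y hy; exact (List.pairwise_cons.mp hrest).1 y hy
      have hprelt : ∀ x ∈ pre, x.1 < p := by
        intro x hx; exact hcross x hx (p, c) List.mem_cons_self
      -- c does not occur in pre.map snd
      have hnc : c ∉ pre.map (·.2) := by
        intro hc
        rcases List.mem_map.mp hc with ⟨y, hy, hyc⟩
        exact h3 y hy hyc
      -- idxOf computes pre.length
      have hmap : s.map (·.2) = pre.map (·.2) ++ c :: suf.map (·.2) := by simp [h1]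
      have hidx : (s.map (·.2)).idxOf c = pre.length := by
        rw [hmap, List.idxOf_append_of_notMem hnc]
        simp
      have herase : (s.map (·.2)).erase c = s'.map (·.2) := by
        rw [hmap, List.erase_append_right _ hnc, List.erase_cons_head, h2]
        simp
      -- count of smaller positions among the remaining matches
      have hcount : ((pvPosSpec lt s').countP (fun q => q < p) : Nat) = pre.length := by
        rw [(pv_posSpec_perm lt s' hlt).countP_eq]
        rw [List.countP_map]
        rw [h2, List.countP_append]
        have c1 : pre.countP ((fun q => decide (q < p)) ∘ (·.1)) = pre.length :=
          List.countP_eq_length.mpr (fun x hx => by simpa using hprelt x hx)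
        have c2 : suf.countP ((fun q => decide (q < p)) ∘ (·.1)) = 0 :=
          List.countP_eq_zero.mpr (fun x hx => by simpa using not_lt.mpr (le_of_lt (hsufgt x hx)))
        omega
      rw [pvGreedy, pvPosSpec, hps]
      rw [pvInvSpec, hidx, herase, ih s' hlt hpw', hcount]

-- len(seen) - bisect_left(seen, p) counts the elements of seen greater than p
lemma pv_bisect_count (seen : List Int) (p : Int)
    (hsort : seen.Pairwise (· ≤ ·)) (hp : p ∉ seen) :
    (seen.length : Int) - (PySem.List.bisectLeft seen p : Int)
      = ((seen.countP (fun x => p < x) : Nat) : Int) := by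
  obtain ⟨hle, hlt, hge⟩ := PySem.List.bisectLeft_spec seen p hsort
  set bl := PySem.List.bisectLeft seen p with hbl
  have hsplit : seen = seen.take bl ++ seen.drop bl := (List.take_append_drop _ _).symm
  have hc : seen.countP (fun x => p < x)
      = (seen.take bl).countP (fun x => p < x) + (seen.drop bl).countP (fun x => p < x) := by
    conv_lhs => rw [hsplit]
    exact List.countP_append ..
  have c1 : (seen.take bl).countP (fun x => p < x) = 0 := by
    refine List.countP_eq_zero.mpr ?_
    intro x hx
    rw [List.mem_take_iff_getElem] at hx
    obtain ⟨i, hi, he⟩ := hx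
    have := hlt i (by omega) (by omega)
    simp only [he] at this
    simpa using not_lt.mpr (le_of_lt this)
  have c2 : (seen.drop bl).countP (fun x => p < x) = (seen.drop bl).length := by
    refine List.countP_eq_length.mpr ?_
    intro x hx
    rw [List.mem_drop_iff_getElem] at hx
    obtain ⟨i, hi, he⟩ := hx
    have h1 := hge (bl + i) (by omega) (by omega)
    rw [he] at h1
    have h2 : x ≠ p := by
      intro hxe; exact hp (hxe ▸ (by rw [← he]; exact List.getElem_mem _))
    simpa using lt_of_le_of_ne h1 (Ne.symm h2)
  have hlen : (seen.drop bl).length = seen.length - bl := List.length_drop ..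
  omega

-- insort keeps seen sorted and is a permutation of p :: seen
lemma pv_insort (seen : List Int) (p : Int) (hsort : seen.Pairwise (· ≤ ·)) :
    (PySem.List.insert seen ((PySem.List.bisectRight seen p : Nat) : Int) p).Perm (p :: seen) ∧
    (PySem.List.insert seen ((PySem.List.bisectRight seen p : Nat) : Int) p).Pairwise (· ≤ ·) := by
  obtain ⟨hle, hlt, hge⟩ := PySem.List.bisectRight_spec seen p hsort
  set br := PySem.List.bisectRight seen p with hbr
  rw [PySem.List.insert_natCast seen br p hle]
  constructor
  · have hm := @List.perm_middle _ p (seen.take br) (seen.drop br)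
    simpa [List.take_append_drop] using hm
  · have hsplit : seen = seen.take br ++ seen.drop br := (List.take_append_drop _ _).symm
    have hpw2 : (seen.take br ++ seen.drop br).Pairwise (· ≤ ·) := by rw [← hsplit]; exact hsort
    obtain ⟨pw1, pw2, pwc⟩ := List.pairwise_append.mp hpw2
    refine List.pairwise_append.mpr ⟨pw1, ?_, ?_⟩
    · refine List.pairwise_cons.mpr ⟨?_, pw2⟩
      intro x hx
      rw [List.mem_drop_iff_getElem] at hx
      obtain ⟨i, hi, he⟩ := hx
      have := hge (br + i) (by omega) (by omega)
      rw [he] at this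
      exact le_of_lt this
    · intro x hx y hy
      rcases List.mem_cons.mp hy with rfl | hy
      · rw [List.mem_take_iff_getElem] at hx
        obtain ⟨i, hi, he⟩ := hx
        have := hlt i (by omega) (by omega)
        rw [he] at this
        exact this
      · exact pwc x hx y hy

lemma pv_sum_shift (seen seen' : List Int) (p : Int)
    (hsplit : ∀ q : Int, (seen'.countP (fun x => q < x) : Nat)
        = (seen.countP (fun x => q < x)) + (if q < p then 1 else 0)) :
    ∀ qs : List Int, (qs.map (fun q => ((seen'.countP (fun x => q < x) : Nat) : Int))).sum
      = (qs.map (fun q => ((seen.countP (fun x => q < x) : Nat) : Int))).sum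
        + ((qs.countP (fun q => q < p) : Nat) : Int) := by
  intro qs
  induction qs with
  | nil => simp
  | cons q qs ihq =>
      simp only [List.map_cons, List.sum_cons, List.countP_cons, hsplit q, ihq]
      by_cases hqp : q < p <;> simp [hqp] <;> ring

lemma pv_invLoop : ∀ (ps seen : List Int) (ans : Int),
    seen.Pairwise (· ≤ ·) → (∀ x ∈ ps, x ∉ seen) → ps.Nodup →
    pvInvLoop ps seen ans =
      ans + pvInvSpec ps + (ps.map (fun p => ((seen.countP (fun x => p < x) : Nat) : Int))).sum := by
  intro ps
  induction ps with
  | nil => intro seen ans _ _ _; simp [pvInvLoop, pvInvSpec]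
  | cons p ps' ih =>
      intro seen ans hsort hnotin hnd
      have hpnot : p ∉ seen := hnotin p List.mem_cons_self
      obtain ⟨hperm, hsort'⟩ := pv_insort seen p hsort
      set seen' := PySem.List.insert seen ((PySem.List.bisectRight seen p : Nat) : Int) p with hseen'
      have hnotin' : ∀ x ∈ ps', x ∉ seen' := by
        intro x hx hmem
        have : x ∈ p :: seen := hperm.mem_iff.mp hmem
        rcases List.mem_cons.mp this with rfl | hm
        · exact (List.nodup_cons.mp hnd).1 hx
        · exact hnotin x (List.mem_cons_of_mem _ hx) hm
      rw [pvInvLoop, ih seen' _ hsort' hnotin' (List.nodup_cons.mp hnd).2]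
      rw [pv_bisect_count seen p hsort hpnot]
      -- counts against seen' split into counts against seen plus comparisons with p
      have hsplit : ∀ q : Int, (seen'.countP (fun x => q < x) : Nat)
          = (seen.countP (fun x => q < x)) + (if q < p then 1 else 0) := by
        intro q
        rw [hperm.countP_eq]
        by_cases hqp : q < p <;> simp [hqp]
      rw [pv_sum_shift seen seen' p hsplit ps', pvInvSpec]
      simp only [List.map_cons, List.sum_cons]
      ring

lemma pv_queues_getD (l : List (Int × Char)) (c : Char) :
    ((l.foldl (fun d p => d.modify p.2 [] (· ++ [p.1])) PySem.Dict.empty).getD c []) =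
      (l.filter (fun p => p.2 == c)).map (·.1) := by
  have hfold : l.foldl (fun d p => d.modify p.2 [] (· ++ [p.1])) PySem.Dict.empty
      = (l.map Prod.swap).foldl (fun d p => d.modify p.1 [] (· ++ [p.2])) PySem.Dict.empty := by
    rw [List.foldl_map]
    rfl
  rw [hfold, PySem.Dict.getD_foldl_modify_append]
  have hfilter : (l.map Prod.swap).filter (fun p => p.1 == c)
      = (l.filter (fun p => p.2 == c)).map Prod.swap := by
    rw [List.filter_map]
    rfl
  rw [hfilter]
  simp only [List.map_map]
  have : ((fun x : Char × Int => x.2) ∘ Prod.swap) = (fun x : Int × Char => x.1) := rfl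
  rw [this]
  rfl

lemma pv_filter_pluck {c : Char} {s : List (Int × Char)} {p : Int} {s' : List (Int × Char)}
    (h : pvPluck c s = some (p, s')) :
    s.filter (fun x => x.2 == c) = (p, c) :: s'.filter (fun x => x.2 == c) ∧
    ∀ c' : Char, c' ≠ c → s.filter (fun x => x.2 == c') = s'.filter (fun x => x.2 == c') := by
  obtain ⟨pre, suf, h1, h2, h3⟩ := pv_pluck_decomp h
  have hnil : pre.filter (fun x => x.2 == c) = [] :=
    List.filter_eq_nil_iff.mpr (fun x hx => by simpa using h3 x hx)
  constructor
  · rw [h1, h2, List.filter_append, List.filter_append, hnil]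
    simp
  · intro c' hne
    rw [h1, h2, List.filter_append, List.filter_append]
    have : ((p, c) :: suf).filter (fun x => x.2 == c') = suf.filter (fun x => x.2 == c') := by
      rw [List.filter_cons]
      simp [Ne.symm hne]
    rw [this]

lemma pv_posList (qd : PySem.Dict Char (List Int)) :
    ∀ (a : List Char) (s : List (Int × Char)) (hd : PySem.Dict Char Int) (acc : List Int),
    (∀ c, 0 ≤ hd.getD c 0) →
    (∀ c, (qd.getD c []).drop (hd.getD c 0).toNat = (s.filter (fun p => p.2 == c)).map (·.1)) →
    a.Perm (s.map (·.2)) →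
    (a.foldl (fun (st : List Int × PySem.Dict Char Int) c =>
        let h := st.2.getD c 0
        (st.1 ++ [PySem.List.pyGetD (qd.getD c []) h 0], st.2.insert c (h + 1)))
      (acc, hd)).1 = acc ++ pvPosSpec a s := by
  intro a
  induction a with
  | nil => intro s hd acc _ _ _; simp [pvPosSpec]
  | cons c a' ih =>
      intro s hd acc hnn hq hperm
      obtain ⟨p, s', hps⟩ := pv_pluck_some (hperm.mem_iff.mp List.mem_cons_self)
      obtain ⟨hfc, hfne⟩ := pv_filter_pluck hps
      have hdrop : (qd.getD c []).drop ((hd.getD c 0).toNat)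
          = p :: (s'.filter (fun x => x.2 == c)).map (·.1) := by
        rw [hq c, hfc]; rfl
      have hlt : (hd.getD c 0).toNat < (qd.getD c []).length := by
        by_contra hge
        rw [List.drop_eq_nil_of_le (by omega)] at hdrop
        exact (List.cons_ne_nil _ _) hdrop.symm
      have hval : PySem.List.pyGetD (qd.getD c []) (hd.getD c 0) 0 = p := by
        rw [PySem.List.pyGetD_eq_getElem (qd.getD c []) 0 (hnn c)
          (by have := hnn c; omega)]
        have h5 : (qd.getD c [])[(hd.getD c 0).toNat]? = some p := by
          rw [← List.head?_drop, hdrop]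
          rfl
        rw [List.getElem?_eq_getElem hlt] at h5
        exact Option.some.inj h5
      have hsnd : (s.map (·.2)).Perm (c :: s'.map (·.2)) := by
        simpa using (pv_pluck_perm hps).map (·.2)
      have hperm' : a'.Perm (s'.map (·.2)) := (hperm.trans hsnd).cons_inv
      have hnn' : ∀ c', 0 ≤ (hd.insert c (hd.getD c 0 + 1)).getD c' 0 := by
        intro c'
        rw [PySem.Dict.getD_insert]
        split
        · have := hnn c; omega
        · exact hnn c'
      have hq' : ∀ c', (qd.getD c' []).drop (((hd.insert c (hd.getD c 0 + 1)).getD c' 0).toNat)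
          = (s'.filter (fun x => x.2 == c')).map (·.1) := by
        intro c'
        rw [PySem.Dict.getD_insert]
        split
        · rename_i hc'
          rw [hc']
          have hsucc : (hd.getD c 0 + 1).toNat = (hd.getD c 0).toNat + 1 := by
            have := hnn c; omega
          rw [hsucc, ← List.tail_drop, hdrop]
          rfl
        · rename_i hc'
          rw [hq c', hfne c' hc']
      have := ih s' (hd.insert c (hd.getD c 0 + 1)) (acc ++ [PySem.List.pyGetD (qd.getD c []) (hd.getD c 0) 0]) hnn' hq' hperm'
      simp only [List.foldl_cons]
      rw [this, hval, pvPosSpec, hps]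
      simp

-- the whole count phase: A's pop/index loop equals B's match-then-count-inversions pipeline
lemma pv_main (o l : List Char) (hperm : l.Perm o) :
    pvCountA o.length l o 0
      = pvInvLoop (pvPosList ((PySem.List.enumerate o 0).foldl
          (fun d p => d.modify p.2 [] (· ++ [p.1])) PySem.Dict.empty) l) [] 0 := by
  set s := PySem.List.enumerate o 0 with hs
  have hsnd : s.map (·.2) = o := PySem.List.map_snd_enumerate o 0
  have hpairs : s.Pairwise (fun a b => a.1 < b.1) := PySem.List.pairwise_lt_enumerate o 0
  have hlperm : l.Perm (s.map (·.2)) := hsnd ▸ hperm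
  have hlen : l.length = o.length := hperm.length_eq
  rw [← hlen, pv_countA_greedy l o 0 hperm]
  have hg : pvGreedy l o = pvGreedy l (s.map (·.2)) := by rw [hsnd]
  rw [hg, pv_core l s hlperm hpairs]
  have hpos : pvPosList ((PySem.List.enumerate o 0).foldl
      (fun d p => d.modify p.2 [] (· ++ [p.1])) PySem.Dict.empty) l = pvPosSpec l s := by
    rw [pvPosList]
    rw [pv_posList _ l s PySem.Dict.empty [] (fun c => by rfl)
      (fun c => by simpa using (pv_queues_getD s c)) hlperm]
    simp
  rw [hpos]
  have hnd : (pvPosSpec l s).Nodup := by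
    refine (pv_posSpec_perm l s hlperm).nodup_iff.mpr ?_
    rw [PySem.List.map_fst_enumerate]
    exact PySem.List.nodup_pyRange_one _ _
  rw [pv_invLoop (pvPosSpec l s) [] 0 (by simp) (by simp) hnd]
  simp

-- ===== VERDICT (by name: the statement is the Claim_ definition above) =====
theorem getMinSwaps_spec : Claim_equal_getMinSwaps := by
  intro num k _hdom hpre
  unfold Spec_getMinSwaps
  simp only [getMinSwaps, getMinSwaps_alt]
  have hfold : (PySem.List.pyRange 0 k 1).foldl (fun l _ => pvStepA (num.toList.length : Int) l) num.toList
      = (PySem.List.pyRange 0 k 1).foldl (fun a _ => pvStepB a) num.toList ∧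
      ((PySem.List.pyRange 0 k 1).foldl (fun a _ => pvStepB a) num.toList).Perm num.toList := by
    rcases hpre with hk | h2
    · rw [PySem.List.pyRange_one_eq_nil (by omega)]
      exact ⟨rfl, List.Perm.refl _⟩
    · exact pv_fold_eq num.toList.length _ num.toList rfl h2
  obtain ⟨heq, hperm⟩ := hfold
  rw [heq]
  exact pv_main num.toList _ hperm
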